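-- pv_equiv track=rewrite | github.com/Crazydiamonde/PizzaTiler | PizzaTiler.py | unpackcsv
-- ===== SOURCE A (Python) =====
-- def unpackcsv(file):
--     unpacked = [[]]
--     i = 0
--     word = ""
--     for char in file:
--         if char == "\n":
--             unpacked[i].append(int(word))
--             word = ""
--             i += 1
--             unpacked.append([])
--         elif char == ";":
--             unpacked[i].append(int(word))
--             word = ""
--         else:
--             word += char
--     return unpacked
-- ===== SOURCE B (Python) =====
-- def unpackcsv(file):
--     rows = file.split("\n")
--     out = [[int(t) for t in r.split(";")] for r in rows[:-1]]
--     out.append([int(t) for t in rows[-1].split(";")[:-1]])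
--     return out
-- ===== Notes on version B (the rewrite author's own statement) =====
-- stated objective: idiomatic
-- what changed: Replaces A's per-character state machine (running word, row index, manual flushes) with the idiomatic two-level tokenize-then-convert pass: split on newlines, int-map each row's semicolon-separated fields, dropping the last row's unterminated trailing field which A never flushes.
import Mathlib
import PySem

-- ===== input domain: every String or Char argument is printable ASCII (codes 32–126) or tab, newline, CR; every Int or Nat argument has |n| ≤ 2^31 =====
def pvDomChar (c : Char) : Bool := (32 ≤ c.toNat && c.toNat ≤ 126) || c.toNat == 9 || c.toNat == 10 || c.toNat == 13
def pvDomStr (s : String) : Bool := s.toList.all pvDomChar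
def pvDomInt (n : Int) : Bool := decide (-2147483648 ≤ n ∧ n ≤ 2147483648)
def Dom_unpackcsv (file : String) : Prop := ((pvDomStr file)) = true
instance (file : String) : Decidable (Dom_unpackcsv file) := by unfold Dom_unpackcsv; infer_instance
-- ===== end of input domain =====

-- B replaces A's per-character accumulator loop with the idiomatic two-level split:
-- rows = file.split("\n"), int-map each row's ";"-fields (dropping the last row's
-- unterminated trailing field, which A never flushes).  Objective: idiomatic.

-- ===== PORT A =====
-- State: `done` = finished rows, `cur` = the row A is currently filling (unpacked[i]),
-- `word` = A's running word.  int(word) → PySem.Int.ofChars?; the `.getD 0` is never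
-- taken under Pre_unpackcsv (Python raises ValueError exactly where ofChars? is none).
def unpackcsvA : List Char → List (List Int) → List Int → List Char → List (List Int)
  | [], done, cur, _ => done ++ [cur]
  | c :: rest, done, cur, word =>
    if c = '\n' then
      unpackcsvA rest (done ++ [cur ++ [(PySem.Int.ofChars? word).getD 0]]) [] []
    else if c = ';' then
      unpackcsvA rest done (cur ++ [(PySem.Int.ofChars? word).getD 0]) []
    else
      unpackcsvA rest done cur (word ++ [c])

def unpackcsv (file : String) : List (List Int) :=
  unpackcsvA file.toList [] [] []

-- ===== PORT B =====
-- rows[:-1] = dropLast and rows[-1] = getLastD (rows from split is never empty);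
-- fields[:-1] = dropLast likewise.
def unpackcsvRow (r : List Char) : List Int :=
  (PySem.Chars.splitOn r [';']).map (fun t => (PySem.Int.ofChars? t).getD 0)

def unpackcsv_alt (file : String) : List (List Int) :=
  let rows := PySem.Chars.splitOn file.toList ['\n']
  rows.dropLast.map unpackcsvRow ++
    [((PySem.Chars.splitOn (rows.getLastD []) [';']).dropLast).map
       (fun t => (PySem.Int.ofChars? t).getD 0)]

-- ===== PRECONDITION & SPEC =====
-- The ";"/"\n"-delimited tokens A actually converts: all fields of every row but the
-- last, plus the last row's fields except the unterminated trailing one.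
def pvTokens (cs : List Char) : List (List Char) :=
  let rows := PySem.Chars.splitOn cs ['\n']
  rows.dropLast.flatMap (fun r => PySem.Chars.splitOn r [';']) ++
    (PySem.Chars.splitOn (rows.getLastD []) [';']).dropLast

-- Pre_ excludes exactly the inputs where some converted token is not a valid int
-- literal, on which Python's int() (hence A) raises ValueError.
def Pre_unpackcsv (file : String) : Prop :=
  ∀ t ∈ pvTokens file.toList, (PySem.Int.ofChars? t).isSome = true

instance (file : String) : Decidable (Pre_unpackcsv file) := by
  unfold Pre_unpackcsv; infer_instance

def pvWitness_unpackcsv : String := "1;2\n-3\n"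

def Spec_unpackcsv (file : String) (out : List (List Int)) : Prop := out = unpackcsv_alt file
instance (file : String) (out : List (List Int)) : Decidable (Spec_unpackcsv file out) := by unfold Spec_unpackcsv; infer_instance

-- ===== CLAIM (what is proved, stated in full; the proofs are below) =====
def Claim_equal_unpackcsv : Prop := ∀ (file : String), Dom_unpackcsv file → Pre_unpackcsv file → Spec_unpackcsv file (unpackcsv file)

-- ===== LEMMAS AND PROOFS =====

theorem pv_modifyHead_id {α : Type} (L : List α) : List.modifyHead (fun x => x) L = L := by
  cases L <;> rfl

-- PySem.Chars.splitOn with a one-character separator is List.splitOnP on equality.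
theorem pv_go_spec (c : Char) : ∀ (fuel : ℕ) (l cur : List Char) (acc : List (List Char)),
    l.length ≤ fuel →
    PySem.Chars.splitOn.go [c] fuel l cur acc =
      acc.reverse ++ List.modifyHead (cur.reverse ++ ·) (List.splitOnP (· == c) l) := by
  intro fuel
  induction fuel with
  | zero =>
    intro l cur acc h
    have : l = [] := List.eq_nil_of_length_eq_zero (Nat.le_zero.mp h)
    subst this
    simp [PySem.Chars.splitOn.go, List.splitOnP_nil]
  | succ n ih =>
    intro l cur acc h
    cases l with
    | nil => simp [PySem.Chars.splitOn.go, List.splitOnP_nil]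
    | cons x rest =>
      by_cases hx : x = c
      · subst hx
        have hpre : [x].isPrefixOf (x :: rest) = true := by simp [List.isPrefixOf]
        rw [PySem.Chars.splitOn.go]
        simp only [hpre, if_true, List.length_nil, List.length_cons, Nat.zero_add,
          List.drop_succ_cons, List.drop_zero] at *
        rw [ih rest [] (cur.reverse :: acc) (by omega)]
        simp [List.splitOnP_cons, pv_modifyHead_id]
      · have hne : (x == c) = false := beq_eq_false_iff_ne.mpr hx
        have hpre : [c].isPrefixOf (x :: rest) = false := by
          simp only [List.isPrefixOf, Bool.and_eq_false_iff]
          left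
          exact beq_eq_false_iff_ne.mpr fun hh => hx hh.symm
        rw [PySem.Chars.splitOn.go]
        simp only [hpre, Bool.false_eq_true, if_false]
        rw [ih rest (x :: cur) acc (by simpa using Nat.le_of_succ_le_succ h)]
        rw [List.splitOnP_cons, hne]
        simp only [Bool.false_eq_true, if_false, List.modifyHead_modifyHead]
        congr 1
        cases hsp : List.splitOnP (· == c) rest with
        | nil => exact absurd hsp (List.splitOnP_ne_nil _ _)
        | cons a t => simp

theorem pv_splitOn_single (cs : List Char) (c : Char) :
    PySem.Chars.splitOn cs [c] = List.splitOnP (· == c) cs := by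
  rw [PySem.Chars.splitOn, pv_go_spec c _ _ _ _ (by omega)]
  cases hsp : List.splitOnP (· == c) cs with
  | nil => exact absurd hsp (List.splitOnP_ne_nil _ _)
  | cons a t => simp

theorem pv_splitOnP_no_sep {p : Char → Bool} {w : List Char}
    (h : ∀ x ∈ w, p x = false) : List.splitOnP p w = [w] := by
  induction w with
  | nil => simp [List.splitOnP_nil]
  | cons a t ih =>
    have ha : p a = false := h a (by simp)
    rw [List.splitOnP_cons, ha]
    simp only [Bool.false_eq_true, if_false, ih (fun x hx => h x (by simp [hx]))]
    rfl

theorem pv_splitOnP_append_no_sep {p : Char → Bool} {w : List Char} (l : List Char)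
    (h : ∀ x ∈ w, p x = false) :
    List.splitOnP p (w ++ l) = List.modifyHead (w ++ ·) (List.splitOnP p l) := by
  induction w with
  | nil =>
    simp only [List.nil_append]
    cases hsp : List.splitOnP p l with
    | nil => exact absurd hsp (List.splitOnP_ne_nil _ _)
    | cons a t => simp
  | cons a t ih =>
    have ha : p a = false := h a (by simp)
    rw [List.cons_append, List.splitOnP_cons, ha]
    simp only [Bool.false_eq_true, if_false, ih (fun x hx => h x (by simp [hx])),
      List.modifyHead_modifyHead]
    cases hsp : List.splitOnP p l with
    | nil => exact absurd hsp (List.splitOnP_ne_nil _ _)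
    | cons b u => simp

-- B's result, phrased over splitOnP (what unpackcsv_alt computes, after pv_splitOn_single).
def pvB (cs : List Char) : List (List Int) :=
  let rows := List.splitOnP (· == '\n') cs
  rows.dropLast.map (fun r => (List.splitOnP (· == ';') r).map (fun t => (PySem.Int.ofChars? t).getD 0)) ++
    [((List.splitOnP (· == ';') (rows.getLastD [])).dropLast).map (fun t => (PySem.Int.ofChars? t).getD 0)]

theorem pv_alt_eq_pvB (file : String) : unpackcsv_alt file = pvB file.toList := by
  unfold unpackcsv_alt pvB unpackcsvRow
  simp only [pv_splitOn_single]

-- the main loop invariant: A's loop with pending word/cur equals done ++ B on word++cs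
theorem pv_invariant : ∀ (cs : List Char) (done : List (List Int)) (cur : List Int)
    (word : List Char), (∀ x ∈ word, x ≠ '\n' ∧ x ≠ ';') →
    unpackcsvA cs done cur word = done ++ List.modifyHead (cur ++ ·) (pvB (word ++ cs)) := by
  intro cs
  induction cs with
  | nil =>
    intro done cur word hw
    have h1 : List.splitOnP (· == '\n') word = [word] :=
      pv_splitOnP_no_sep (fun x hx => by simp [(hw x hx).1])
    have h2 : List.splitOnP (· == ';') word = [word] :=
      pv_splitOnP_no_sep (fun x hx => by simp [(hw x hx).2])
    simp [unpackcsvA, pvB, h1, h2]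
  | cons c rest ih =>
    intro done cur word hw
    by_cases hnl : c = '\n'
    · subst hnl
      rw [unpackcsvA]
      simp only [if_true]
      rw [ih _ _ [] (by simp)]
      have hrows : List.splitOnP (· == '\n') (word ++ '\n' :: rest)
          = List.modifyHead (word ++ ·) ([] :: List.splitOnP (· == '\n') rest) := by
        rw [pv_splitOnP_append_no_sep _ (fun x hx => by simp [(hw x hx).1])]
        rw [List.splitOnP_cons]; simp
      have h2 : List.splitOnP (· == ';') word = [word] :=
        pv_splitOnP_no_sep (fun x hx => by simp [(hw x hx).2])
      cases hsp : List.splitOnP (· == '\n') rest with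
      | nil => exact absurd hsp (List.splitOnP_ne_nil _ _)
      | cons r t =>
        simp [pvB, hrows, hsp, h2, List.nil_append, pv_modifyHead_id]
    · by_cases hsc : c = ';'
      · subst hsc
        rw [unpackcsvA]
        simp only [hnl, if_false, if_true]
        rw [ih _ _ [] (by simp)]
        have hrows : List.splitOnP (· == '\n') (word ++ ';' :: rest)
            = List.modifyHead (fun x => word ++ ';' :: x) (List.splitOnP (· == '\n') rest) := by
          have h := pv_splitOnP_append_no_sep (p := (· == '\n')) (w := word ++ [';']) rest (by
            intro x hx
            rcases List.mem_append.mp hx with h | h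
            · simp [(hw x h).1]
            · simp at h; subst h; decide)
          rw [show (word ++ [';']) ++ rest = word ++ ';' :: rest from by simp] at h
          rw [h]
          congr 1
          funext x
          simp
        cases hsp : List.splitOnP (· == '\n') rest with
        | nil => exact absurd hsp (List.splitOnP_ne_nil _ _)
        | cons r t =>
          have hfirst : List.splitOnP (· == ';') (word ++ ';' :: r)
              = word :: List.splitOnP (· == ';') r := by
            rw [pv_splitOnP_append_no_sep _ (fun x hx => by simp [(hw x hx).2])]
            rw [List.splitOnP_cons]; simp
          cases t with
          | nil =>
            have hr2 : List.splitOnP (· == ';') r ≠ [] := List.splitOnP_ne_nil _ _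
            cases hsp2 : List.splitOnP (· == ';') r with
            | nil => exact absurd hsp2 hr2
            | cons b u =>
              simp [pvB, hrows, hsp, hfirst, hsp2]
          | cons r2 t2 =>
            simp [pvB, hrows, hsp, hfirst]
      · rw [unpackcsvA]
        simp only [hnl, hsc, if_false]
        rw [ih _ _ (word ++ [c]) (by
          intro x hx
          rcases List.mem_append.mp hx with h | h
          · exact hw x h
          · simp at h; subst h; exact ⟨hnl, hsc⟩)]
        simp

-- ===== VERDICT (by name: the statement is the Claim_ definition above) =====
theorem unpackcsv_spec : Claim_equal_unpackcsv := by
  intro file _ _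
  unfold Spec_unpackcsv unpackcsv
  rw [pv_alt_eq_pvB, pv_invariant file.toList [] [] [] (by simp)]
  simp [pv_modifyHead_id]
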